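-- pv_equiv track=rewrite | github.com/isi-metaphor/lcc-service | legacy/extractor-2014-01.py | isLinkedbyParse
-- ===== SOURCE A (Python) =====
-- def isLinkedbyParse(v1, v2, word_props, equalities, input_been, pathlength):
--     if v1 == v2:
--         return pathlength
--
--     pathlength += 1
--     if pathlength == 9:
--         return pathlength
--
--     been = list(input_been)
--     if (v1, v2) in been:
--         return 9
--     been.append((v1, v2))
--     been.append((v2, v1))
--
--     # print (v1, v2, pathlength)
--
--     # if equalities.has_key(v1) and equalities[v1].has_key(v2):
--     #     return 2
--
--     nbrs = []
--     for (propName, args) in word_props: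
--         if v1 in args:
--             if v2 in args:
--                 return pathlength
--
--             for a in args:
--                 if a != v1:
--                     nbrs.append(a)
--
--     pl = 9
--     for n in nbrs:
--         npl = isLinkedbyParse(n, v2, word_props, equalities, been, pathlength)
--         if npl < pl:
--             pl = npl
--     return pl
-- ===== SOURCE B (Python) =====
-- def isLinkedbyParse(v1, v2, word_props, equalities, input_been, pathlength):
--     if v1 == v2:
--         return pathlength
--
--     blocked = set()
--     for (u, w) in input_been:
--         if w == v2:
--             blocked.add(u)
--     if v1 in blocked:
--         return 9
--
--     if any(v1 in args and v2 in args for _, args in word_props):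
--         return pathlength + 1
--
--     # breadth-first search over the co-occurrence graph (two words are
--     # linked when they appear in the same prop), skipping blocked words
--     frontier = {v1}
--     seen = {v1} | blocked
--     dist = 1
--     while frontier:
--         nxt = set()
--         for _, args in word_props:
--             if any(a in frontier for a in args):
--                 if v2 in args:
--                     return min(9, pathlength + dist)
--                 nxt.update(args)
--         frontier = nxt - seen
--         seen |= frontier
--         dist += 1
--     return 9
-- ===== Notes on version B (the rewrite author's own statement) =====
-- stated objective: alternative
-- what changed: Replaces the recursive DFS that enumerates simple paths (re-scanning word_props in every recursive call with a per-path visited list) by a single breadth-first level search over the co-occurrence graph, returning min(9, pathlength + distance).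
import Mathlib
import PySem

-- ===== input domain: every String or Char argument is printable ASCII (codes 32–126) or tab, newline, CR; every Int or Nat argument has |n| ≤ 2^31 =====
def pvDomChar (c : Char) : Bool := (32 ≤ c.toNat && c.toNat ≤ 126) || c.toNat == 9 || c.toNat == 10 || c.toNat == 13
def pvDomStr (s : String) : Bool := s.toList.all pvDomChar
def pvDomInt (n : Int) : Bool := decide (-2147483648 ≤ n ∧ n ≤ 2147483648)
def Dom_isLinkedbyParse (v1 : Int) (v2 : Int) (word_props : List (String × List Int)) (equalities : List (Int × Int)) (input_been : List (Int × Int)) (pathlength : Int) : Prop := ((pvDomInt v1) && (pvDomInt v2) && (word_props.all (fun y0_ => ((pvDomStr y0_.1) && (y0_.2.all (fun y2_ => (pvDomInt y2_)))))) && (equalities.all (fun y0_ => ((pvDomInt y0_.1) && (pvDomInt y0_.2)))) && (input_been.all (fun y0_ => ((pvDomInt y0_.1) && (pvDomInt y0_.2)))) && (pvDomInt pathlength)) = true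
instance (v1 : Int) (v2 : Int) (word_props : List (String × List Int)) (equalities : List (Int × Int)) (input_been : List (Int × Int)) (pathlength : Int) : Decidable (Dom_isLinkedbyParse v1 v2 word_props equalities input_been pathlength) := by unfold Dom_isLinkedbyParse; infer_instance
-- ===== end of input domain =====

-- B replaces A's exponential DFS over all simple paths by one breadth-first level
-- search over the co-occurrence graph; same return value everywhere (A is total).

-- ===== PORT A =====
-- all word ids occurring in word_props (vertex universe, used by the termination measure)
def lbpU (word_props : List (String × List Int)) : Finset Int :=
  (word_props.flatMap (fun pa => pa.2)).toFinset

theorem mem_lbpU (word_props : List (String × List Int)) (x : Int) :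
    x ∈ lbpU word_props ↔ ∃ pa ∈ word_props, x ∈ pa.2 := by
  simp [lbpU, List.mem_flatMap]

-- the `for (propName, args) in word_props` loop of A: `none` = the early `return pathlength`
-- (v1 and v2 share a prop), `some nbrs` = the collected neighbour list
def lbpLoop (v1 v2 : Int) : List (String × List Int) → List Int → Option (List Int)
  | [], nbrs => some nbrs
  | pa :: rest, nbrs =>
    if v1 ∈ pa.2 then
      if v2 ∈ pa.2 then none
      else lbpLoop v1 v2 rest (pa.2.foldl (fun acc a => if a ≠ v1 then acc ++ [a] else acc) nbrs)
    else lbpLoop v1 v2 rest nbrs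

theorem lbpInner_mem (v1 : Int) (l acc : List Int) (x : Int) :
    x ∈ l.foldl (fun acc a => if a ≠ v1 then acc ++ [a] else acc) acc ↔
      x ∈ acc ∨ (x ∈ l ∧ x ≠ v1) := by
  induction l generalizing acc with
  | nil => simp
  | cons a t ih =>
    simp only [List.foldl_cons, List.mem_cons]
    by_cases ha : a = v1
    · rw [if_neg (by simp [ha]), ih]
      constructor
      · rintro (h | ⟨h1, h2⟩)
        · exact Or.inl h
        · exact Or.inr ⟨Or.inr h1, h2⟩
      · rintro (h | ⟨(rfl | h1), h2⟩)
        · exact Or.inl h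
        · exact absurd ha h2
        · exact Or.inr ⟨h1, h2⟩
    · rw [if_pos ha, ih]
      constructor
      · rintro (h | ⟨h1, h2⟩)
        · rcases List.mem_append.mp h with h | h
          · exact Or.inl h
          · simp only [List.mem_singleton] at h
            subst h
            exact Or.inr ⟨Or.inl rfl, ha⟩
        · exact Or.inr ⟨Or.inr h1, h2⟩
      · rintro (h | ⟨(rfl | h1), h2⟩)
        · exact Or.inl (List.mem_append.mpr (Or.inl h))
        · exact Or.inl (List.mem_append.mpr (Or.inr (by simp)))
        · exact Or.inr ⟨h1, h2⟩

theorem lbpLoop_some_iff (v1 v2 : Int) (l : List (String × List Int)) (acc nbrs : List Int)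
    (h : lbpLoop v1 v2 l acc = some nbrs) (x : Int) :
    x ∈ nbrs ↔ x ∈ acc ∨ ∃ pa ∈ l, v1 ∈ pa.2 ∧ x ∈ pa.2 ∧ x ≠ v1 := by
  induction l generalizing acc with
  | nil => simp only [lbpLoop, Option.some.injEq] at h; subst h; simp
  | cons pa rest ih =>
    simp only [lbpLoop] at h
    by_cases h1 : v1 ∈ pa.2
    · by_cases h2 : v2 ∈ pa.2
      · simp [h1, h2] at h
      · simp only [h1, h2, if_true, if_false] at h
        rw [ih _ h, lbpInner_mem]
        simp only [List.mem_cons]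
        constructor
        · rintro ((hx | hx) | ⟨pa', hpa', hq⟩)
          · exact Or.inl hx
          · exact Or.inr ⟨pa, Or.inl rfl, h1, hx.1, hx.2⟩
          · exact Or.inr ⟨pa', Or.inr hpa', hq⟩
        · rintro (hx | ⟨pa', (rfl | hpa'), hq⟩)
          · exact Or.inl (Or.inl hx)
          · exact Or.inl (Or.inr ⟨hq.2.1, hq.2.2⟩)
          · exact Or.inr ⟨pa', hpa', hq⟩
    · simp only [h1, if_false] at h
      rw [ih _ h]
      simp only [List.mem_cons]
      constructor
      · rintro (hx | ⟨pa', hpa', hq⟩)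
        · exact Or.inl hx
        · exact Or.inr ⟨pa', Or.inr hpa', hq⟩
      · rintro (hx | ⟨pa', (rfl | hpa'), hq⟩)
        · exact Or.inl hx
        · exact absurd hq.1 h1
        · exact Or.inr ⟨pa', hpa', hq⟩

-- termination measure for A's recursion: unblocked universe words, weighted, plus a
-- start-vertex indicator
def lbpMeasure (v2 : Int) (word_props : List (String × List Int)) (v1 : Int)
    (been : List (Int × Int)) : ℕ :=
  2 * ((lbpU word_props).filter (fun u => (u, v2) ∉ been)).card +
    (if v1 ∈ lbpU word_props then (if (v1, v2) ∈ been then 0 else 1) else 2)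

theorem lbpMeasure_lt (v2 : Int) (word_props : List (String × List Int)) (v1 n : Int)
    (been : List (Int × Int)) (h1 : v1 ≠ v2) (h2 : (v1, v2) ∉ been) (h3 : n ∈ lbpU word_props) :
    lbpMeasure v2 word_props n (been ++ [(v1, v2), (v2, v1)]) <
      lbpMeasure v2 word_props v1 been := by
  have hsub : ((lbpU word_props).filter (fun u => (u, v2) ∉ been ++ [(v1, v2), (v2, v1)])) ⊆
      ((lbpU word_props).filter (fun u => (u, v2) ∉ been)) := by
    intro u hu
    simp only [Finset.mem_filter, List.mem_append, List.mem_cons, List.mem_singleton] at *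
    exact ⟨hu.1, fun hc => hu.2 (Or.inl hc)⟩
  by_cases hv : v1 ∈ lbpU word_props
  · have hlt : ((lbpU word_props).filter (fun u => (u, v2) ∉ been ++ [(v1, v2), (v2, v1)])).card <
        ((lbpU word_props).filter (fun u => (u, v2) ∉ been)).card := by
      apply Finset.card_lt_card
      refine ⟨hsub, fun hall => ?_⟩
      have hv1 : v1 ∈ (lbpU word_props).filter (fun u => (u, v2) ∉ been) := by
        simp [Finset.mem_filter, hv, h2]
      have := hall hv1
      rw [Finset.mem_filter] at this
      exact this.2 (List.mem_append.mpr (Or.inr (by simp)))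
    have hterm : (if n ∈ lbpU word_props then
        (if (n, v2) ∈ been ++ [(v1, v2), (v2, v1)] then 0 else 1) else 2) ≤ 1 := by
      rw [if_pos h3]; split <;> omega
    unfold lbpMeasure
    rw [if_pos hv, if_neg h2]
    omega
  · have hle := Finset.card_le_card hsub
    have hterm : (if n ∈ lbpU word_props then
        (if (n, v2) ∈ been ++ [(v1, v2), (v2, v1)] then 0 else 1) else 2) ≤ 1 := by
      rw [if_pos h3]; split <;> omega
    unfold lbpMeasure
    rw [if_neg hv]
    omega

def isLinkedbyParse (v1 : Int) (v2 : Int) (word_props : List (String × List Int)) (equalities : List (Int × Int)) (input_been : List (Int × Int)) (pathlength : Int) : Int :=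
  if v1 = v2 then pathlength
  else if pathlength + 1 = 9 then pathlength + 1
  else if (v1, v2) ∈ input_been then 9
  else
    match hL : lbpLoop v1 v2 word_props [] with
    | none => pathlength + 1
    | some nbrs =>
      (nbrs.attach.map (fun n =>
        isLinkedbyParse n.1 v2 word_props equalities
          (input_been ++ [(v1, v2), (v2, v1)]) (pathlength + 1))).foldl
        (fun pl npl => if npl < pl then npl else pl) 9
termination_by lbpMeasure v2 word_props v1 input_been
decreasing_by
  rename_i h12 _ hbeen
  have hmem := (lbpLoop_some_iff v1 v2 word_props [] nbrs hL n.1).mp n.2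
  simp only [List.not_mem_nil, false_or] at hmem
  obtain ⟨pa, hpa, _, hnpa, _⟩ := hmem
  exact lbpMeasure_lt v2 word_props v1 n.1 input_been h12 hbeen
    ((mem_lbpU word_props n.1).mpr ⟨pa, hpa, hnpa⟩)

-- ===== PORT B =====
-- one level of B's while-loop body: `none` = the early `return min(9, pathlength+dist)`
-- (a prop meets the frontier and contains v2), `some nxt` = the collected next level
def lbpScan (v2 : Int) (frontier : Finset Int) :
    List (String × List Int) → Finset Int → Option (Finset Int)
  | [], nxt => some nxt
  | pa :: rest, nxt =>
    if ∃ a ∈ pa.2, a ∈ frontier then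
      if v2 ∈ pa.2 then none
      else lbpScan v2 frontier rest (nxt ∪ pa.2.toFinset)
    else lbpScan v2 frontier rest nxt

theorem lbpScan_some (v2 : Int) (frontier : Finset Int) (l : List (String × List Int))
    (acc nxt : Finset Int) (h : lbpScan v2 frontier l acc = some nxt) :
    (∀ x, x ∈ nxt ↔ x ∈ acc ∨ ∃ pa ∈ l, (∃ a ∈ pa.2, a ∈ frontier) ∧ x ∈ pa.2) ∧
      (∀ pa ∈ l, (∃ a ∈ pa.2, a ∈ frontier) → v2 ∉ pa.2) := by
  induction l generalizing acc with
  | nil =>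
    simp only [lbpScan, Option.some.injEq] at h; subst h; simp
  | cons pa rest ih =>
    simp only [lbpScan] at h
    by_cases h1 : ∃ a ∈ pa.2, a ∈ frontier
    · by_cases h2 : v2 ∈ pa.2
      · simp [h1, h2] at h
      · simp only [h1, h2, if_true, if_false] at h
        obtain ⟨hm, hv⟩ := ih _ h
        constructor
        · intro x
          rw [hm x]
          simp only [Finset.mem_union, List.mem_toFinset, List.mem_cons]
          constructor
          · rintro ((hx | hx) | ⟨pa', hpa', hx⟩)
            · exact Or.inl hx
            · exact Or.inr ⟨pa, Or.inl rfl, h1, hx⟩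
            · exact Or.inr ⟨pa', Or.inr hpa', hx⟩
          · rintro (hx | ⟨pa', (rfl | hpa'), hx⟩)
            · exact Or.inl (Or.inl hx)
            · exact Or.inl (Or.inr hx.2)
            · exact Or.inr ⟨pa', hpa', hx⟩
        · intro pa' hpa'
          rcases List.mem_cons.mp hpa' with rfl | hpa'
          · exact fun _ => h2
          · exact hv pa' hpa'
    · simp only [h1, if_false] at h
      obtain ⟨hm, hv⟩ := ih _ h
      constructor
      · intro x
        rw [hm x]
        simp only [List.mem_cons]
        constructor
        · rintro (hx | ⟨pa', hpa', hx⟩)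
          · exact Or.inl hx
          · exact Or.inr ⟨pa', Or.inr hpa', hx⟩
        · rintro (hx | ⟨pa', (rfl | hpa'), hx⟩)
          · exact Or.inl hx
          · exact absurd hx.1 h1
          · exact Or.inr ⟨pa', hpa', hx⟩
      · intro pa' hpa'
        rcases List.mem_cons.mp hpa' with rfl | hpa'
        · exact fun hc => absurd hc h1
        · exact hv pa' hpa'

def lbpBMeasure (word_props : List (String × List Int)) (frontier seen : Finset Int) : ℕ :=
  2 * ((lbpU word_props) \ seen).card + (if frontier = ∅ then 0 else 1)

def lbpBfs (v2 : Int) (word_props : List (String × List Int)) (pathlength : Int)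
    (frontier seen : Finset Int) (dist : Int) : Int :=
  if hf : frontier = ∅ then 9
  else
    match hS : lbpScan v2 frontier word_props ∅ with
    | none => min 9 (pathlength + dist)
    | some nxt =>
      lbpBfs v2 word_props pathlength (nxt \ seen) (seen ∪ (nxt \ seen)) (dist + 1)
termination_by lbpBMeasure word_props frontier seen
decreasing_by
  by_cases hne : nxt \ seen = ∅
  · simp only [lbpBMeasure, hne, Finset.union_empty, if_pos, if_neg hf]
    omega
  · obtain ⟨x, hx⟩ := Finset.nonempty_iff_ne_empty.mpr hne
    have hxn : x ∈ nxt ∧ x ∉ seen := by simpa [Finset.mem_sdiff] using hx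
    have hxU : x ∈ lbpU word_props := by
      have := ((lbpScan_some v2 frontier word_props ∅ nxt hS).1 x).mp hxn.1
      simp only [Finset.notMem_empty, false_or] at this
      obtain ⟨pa, hpa, _, hxpa⟩ := this
      exact (mem_lbpU word_props x).mpr ⟨pa, hpa, hxpa⟩
    have hlt : ((lbpU word_props) \ (seen ∪ (nxt \ seen))).card <
        ((lbpU word_props) \ seen).card := by
      apply Finset.card_lt_card
      constructor
      · intro u hu
        simp only [Finset.mem_sdiff, Finset.mem_union] at *
        exact ⟨hu.1, fun hc => hu.2 (Or.inl hc)⟩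
      · intro hall
        have hx1 : x ∈ (lbpU word_props) \ seen := by
          simp only [Finset.mem_sdiff]
          exact ⟨hxU, hxn.2⟩
        have := hall hx1
        simp only [Finset.mem_sdiff, Finset.mem_union] at this
        exact this.2 (Or.inr ⟨hxn.1, hxn.2⟩)
    simp only [lbpBMeasure, if_neg hf]
    have hind : (if nxt \ seen = ∅ then 0 else 1) ≤ 1 := by split <;> omega
    omega

def isLinkedbyParse_alt (v1 : Int) (v2 : Int) (word_props : List (String × List Int)) (equalities : List (Int × Int)) (input_been : List (Int × Int)) (pathlength : Int) : Int :=
  if v1 = v2 then pathlength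
  else
    let blocked := input_been.foldl
      (fun acc p => if p.2 = v2 then insert p.1 acc else acc) (∅ : Finset Int)
    if v1 ∈ blocked then 9
    else if ∃ pa ∈ word_props, v1 ∈ pa.2 ∧ v2 ∈ pa.2 then pathlength + 1
    else lbpBfs v2 word_props pathlength {v1} (insert v1 blocked) 1

-- ===== PRECONDITION & SPEC =====
def Spec_isLinkedbyParse (v1 : Int) (v2 : Int) (word_props : List (String × List Int)) (equalities : List (Int × Int)) (input_been : List (Int × Int)) (pathlength : Int) (out : Int) : Prop := out = isLinkedbyParse_alt v1 v2 word_props equalities input_been pathlength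
instance (v1 : Int) (v2 : Int) (word_props : List (String × List Int)) (equalities : List (Int × Int)) (input_been : List (Int × Int)) (pathlength : Int) (out : Int) : Decidable (Spec_isLinkedbyParse v1 v2 word_props equalities input_been pathlength out) := by unfold Spec_isLinkedbyParse; infer_instance

-- ===== CLAIM (what is proved, stated in full; the proofs are below) =====
def Claim_equal_isLinkedbyParse : Prop := ∀ (v1 : Int) (v2 : Int) (word_props : List (String × List Int)) (equalities : List (Int × Int)) (input_been : List (Int × Int)) (pathlength : Int), Dom_isLinkedbyParse v1 v2 word_props equalities input_been pathlength → Spec_isLinkedbyParse v1 v2 word_props equalities input_been pathlength (isLinkedbyParse v1 v2 word_props equalities input_been pathlength)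

-- ===== LEMMAS AND PROOFS =====

theorem lbpLoop_none_iff (v1 v2 : Int) (l : List (String × List Int)) (acc : List Int) :
    lbpLoop v1 v2 l acc = none ↔ ∃ pa ∈ l, v1 ∈ pa.2 ∧ v2 ∈ pa.2 := by
  induction l generalizing acc with
  | nil => simp [lbpLoop]
  | cons pa rest ih =>
    simp only [lbpLoop]
    by_cases h1 : v1 ∈ pa.2
    · by_cases h2 : v2 ∈ pa.2
      · simp [h1, h2]
      · simp [h1, h2, ih]
    · simp [h1, ih]

theorem lbpScan_none_iff (v2 : Int) (frontier : Finset Int) (l : List (String × List Int))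
    (acc : Finset Int) :
    lbpScan v2 frontier l acc = none ↔ ∃ pa ∈ l, (∃ a ∈ pa.2, a ∈ frontier) ∧ v2 ∈ pa.2 := by
  induction l generalizing acc with
  | nil => simp [lbpScan]
  | cons pa rest ih =>
    simp only [lbpScan]
    by_cases h1 : ∃ a ∈ pa.2, a ∈ frontier
    · by_cases h2 : v2 ∈ pa.2
      · simp [h1, h2]
      · simp [h1, h2, ih]
    · simp [h1, ih]

-- u and w occur in a common prop of word_props
def edgeP (word_props : List (String × List Int)) (u w : Int) : Prop :=
  ∃ pa ∈ word_props, u ∈ pa.2 ∧ w ∈ pa.2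

-- there is a path of length exactly k from u to v2 whose vertices other than v2 are unblocked
def hp (word_props : List (String × List Int)) (v2 : Int) (B : Int → Prop) : ℕ → Int → Prop
  | 0, _ => False
  | k + 1, u => ¬ B u ∧ ((k = 0 ∧ edgeP word_props u v2) ∨
      ∃ n, edgeP word_props u n ∧ hp word_props v2 B k n)

-- there is a path of length exactly j from x to u, all of whose vertices are unblocked
def rp (word_props : List (String × List Int)) (x : Int) (B : Int → Prop) : ℕ → Int → Prop
  | 0, u => u = x ∧ ¬ B u
  | j + 1, u => ¬ B u ∧ ∃ w, rp word_props x B j w ∧ edgeP word_props w u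

def mrp (word_props : List (String × List Int)) (x : Int) (B : Int → Prop) (j : ℕ) (u : Int) :
    Prop :=
  rp word_props x B j u ∧ ∀ i < j, ¬ rp word_props x B i u

-- characterization shared by both ports: Φ is "min 9 (P + shortest hp-distance)"
def GoodV (word_props : List (String × List Int)) (v2 : Int) (B : Int → Prop) (P : Int)
    (v1 : Int) (Φ : Int) : Prop :=
  Φ ≤ 9 ∧ (∀ k : ℕ, hp word_props v2 B k v1 → Φ ≤ P + k) ∧
    (Φ = 9 ∨ ∃ k : ℕ, hp word_props v2 B k v1 ∧ Φ = P + k)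

theorem GoodV_unique (word_props : List (String × List Int)) (v2 : Int) (B : Int → Prop)
    (P : Int) (v1 : Int) (a b : Int) (ha : GoodV word_props v2 B P v1 a)
    (hb : GoodV word_props v2 B P v1 b) : a = b := by
  obtain ⟨ha1, ha2, ha3⟩ := ha
  obtain ⟨hb1, hb2, hb3⟩ := hb
  rcases ha3 with rfl | ⟨k, hk, rfl⟩
  · rcases hb3 with rfl | ⟨k, hk, rfl⟩
    · rfl
    · have := ha2 k hk
      omega
  · rcases hb3 with rfl | ⟨k', hk', rfl⟩
    · have := hb2 k hk
      omega
    · have h1 := ha2 k' hk'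
      have h2 := hb2 k hk
      omega

theorem hp_pos (word_props : List (String × List Int)) (v2 : Int) (B : Int → Prop) (k : ℕ)
    (u : Int) (h : hp word_props v2 B k u) : 1 ≤ k := by
  cases k with
  | zero => exact absurd h (by simp [hp])
  | succ k => omega

theorem hp_not_blocked (word_props : List (String × List Int)) (v2 : Int) (B : Int → Prop)
    (k : ℕ) (u : Int) (h : hp word_props v2 B k u) : ¬ B u := by
  cases k with
  | zero => exact absurd h (by simp [hp])
  | succ k => exact h.1

theorem hp_mono (word_props : List (String × List Int)) (v2 : Int) (B B' : Int → Prop)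
    (hBB : ∀ x, B x → B' x) : ∀ (k : ℕ) (u : Int), hp word_props v2 B' k u → hp word_props v2 B k u := by
  intro k
  induction k with
  | zero => intro u h; exact absurd h (by simp [hp])
  | succ k ih =>
    intro u h
    obtain ⟨hu, h⟩ := h
    refine ⟨fun hc => hu (hBB u hc), ?_⟩
    rcases h with ⟨hk, he⟩ | ⟨n, he, hn⟩
    · exact Or.inl ⟨hk, he⟩
    · exact Or.inr ⟨n, he, ih n hn⟩

theorem hp_congr (word_props : List (String × List Int)) (v2 : Int) (B B' : Int → Prop)
    (hBB : ∀ x, B x ↔ B' x) (k : ℕ) (u : Int) :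
    hp word_props v2 B k u ↔ hp word_props v2 B' k u :=
  ⟨hp_mono word_props v2 B' B (fun x hx => (hBB x).mpr hx) k u,
   hp_mono word_props v2 B B' (fun x hx => (hBB x).mp hx) k u⟩

-- strip the possible revisits of v1 out of a path from v1
theorem hp_strip (word_props : List (String × List Int)) (v2 v1 : Int) (B : Int → Prop) :
    ∀ (m : ℕ) (u : Int), hp word_props v2 B m u →
      hp word_props v2 (fun x => x = v1 ∨ B x) m u ∨ edgeP word_props v1 v2 ∨
        ∃ n k', edgeP word_props v1 n ∧ hp word_props v2 (fun x => x = v1 ∨ B x) k' n ∧ k' < m := by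
  intro m
  induction m with
  | zero => intro u h; exact absurd h (by simp [hp])
  | succ m ih =>
    intro u h
    obtain ⟨hu, h⟩ := h
    rcases h with ⟨rfl, he⟩ | ⟨n, he, hn⟩
    · by_cases huv : u = v1
      · subst huv; exact Or.inr (Or.inl he)
      · exact Or.inl ⟨by tauto, Or.inl ⟨rfl, he⟩⟩
    · rcases ih n hn with hn' | he' | ⟨n', k', he', hn', hk'⟩
      · by_cases huv : u = v1
        · subst huv
          exact Or.inr (Or.inr ⟨n, m, he, hn', by omega⟩)
        · exact Or.inl ⟨by tauto, Or.inr ⟨n, he, hn'⟩⟩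
      · exact Or.inr (Or.inl he')
      · exact Or.inr (Or.inr ⟨n', k', he', hn', by omega⟩)

theorem rp_cons (word_props : List (String × List Int)) (x : Int) (B : Int → Prop) :
    ∀ (j : ℕ) (u : Int),
      (¬ B x ∧ ∃ n, edgeP word_props x n ∧ rp word_props n B j u) ↔ rp word_props x B (j + 1) u := by
  intro j
  induction j with
  | zero =>
    intro u
    constructor
    · rintro ⟨hx, n, he, rfl, hu⟩
      exact ⟨hu, x, ⟨rfl, hx⟩, he⟩
    · rintro ⟨hu, w, ⟨rfl, hw⟩, he⟩
      exact ⟨hw, u, he, rfl, hu⟩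
  | succ j ih =>
    intro u
    constructor
    · rintro ⟨hx, n, he, hu, w, hw, hwu⟩
      exact ⟨hu, w, (ih w).mp ⟨hx, n, he, hw⟩, hwu⟩
    · rintro ⟨hu, w, hw, hwu⟩
      obtain ⟨hx, n, he, hw'⟩ := (ih w).mpr hw
      exact ⟨hx, n, he, hu, w, hw', hwu⟩

theorem hp_iff_rp (word_props : List (String × List Int)) (v2 : Int) (B : Int → Prop) :
    ∀ (k : ℕ) (x : Int),
      hp word_props v2 B (k + 1) x ↔ ∃ u, rp word_props x B k u ∧ edgeP word_props u v2 := by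
  intro k
  induction k with
  | zero =>
    intro x
    simp only [hp, rp]
    constructor
    · rintro ⟨hx, ⟨_, he⟩ | ⟨n, _, hn⟩⟩
      · exact ⟨x, ⟨rfl, hx⟩, he⟩
      · exact absurd hn (by simp [hp])
    · rintro ⟨u, ⟨rfl, hu⟩, he⟩
      exact ⟨hu, Or.inl ⟨trivial, he⟩⟩
  | succ k ih =>
    intro x
    constructor
    · rintro ⟨hx, ⟨hk, _⟩ | ⟨n, he, hn⟩⟩
      · omega
      · obtain ⟨u, hu, hue⟩ := (ih n).mp hn
        exact ⟨u, (rp_cons word_props x B k u).mp ⟨hx, n, he, hu⟩, hue⟩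
    · rintro ⟨u, hu, hue⟩
      obtain ⟨hx, n, he, hu'⟩ := (rp_cons word_props x B k u).mpr hu
      exact ⟨hx, Or.inr ⟨n, he, (ih n).mpr ⟨u, hu', hue⟩⟩⟩

theorem exists_mrp (word_props : List (String × List Int)) (x : Int) (B : Int → Prop) :
    ∀ (j : ℕ) (u : Int), rp word_props x B j u → ∃ j0 ≤ j, mrp word_props x B j0 u := by
  intro j
  induction j using Nat.strong_induction_on with
  | _ j ih =>
    intro u hu
    by_cases h : ∃ i < j, rp word_props x B i u
    · obtain ⟨i, hi, hrp⟩ := h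
      obtain ⟨j0, hj0, hm⟩ := ih i hi u hrp
      exact ⟨j0, by omega, hm⟩
    · push_neg at h
      exact ⟨j, le_refl j, hu, fun i hi => h i hi⟩

theorem mrp_pred (word_props : List (String × List Int)) (x : Int) (B : Int → Prop) (i : ℕ)
    (u : Int) (h : mrp word_props x B (i + 1) u) : ∃ w, mrp word_props x B i w := by
  obtain ⟨⟨hu, w, hw, hwu⟩, hmin⟩ := h
  obtain ⟨j1, hj1, hm⟩ := exists_mrp word_props x B i w hw
  rcases Nat.lt_or_ge j1 i with hlt | hge
  · exfalso
    exact hmin (j1 + 1) (by omega) ⟨hu, w, hm.1, hwu⟩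
  · have : j1 = i := by omega
    subst this
    exact ⟨w, hm⟩

theorem mrp_below (word_props : List (String × List Int)) (x : Int) (B : Int → Prop) :
    ∀ (j : ℕ) (u : Int), mrp word_props x B j u → ∀ i ≤ j, ∃ w, mrp word_props x B i w := by
  intro j
  induction j with
  | zero =>
    intro u hu i hi
    interval_cases i
    exact ⟨u, hu⟩
  | succ j ih =>
    intro u hu i hi
    rcases Nat.lt_or_ge i (j + 1) with hlt | hge
    · obtain ⟨w, hw⟩ := mrp_pred word_props x B j u hu
      exact ih w hw i (by omega)
    · have : i = j + 1 := by omega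
      subst this
      exact ⟨u, hu⟩

-- fold-min lemmas for A's final loop
theorem foldMin_le_init (l : List Int) (i : Int) :
    l.foldl (fun pl npl => if npl < pl then npl else pl) i ≤ i := by
  induction l generalizing i with
  | nil => simp
  | cons a t ih =>
    simp only [List.foldl_cons]
    exact le_trans (ih _) (by split <;> omega)

theorem foldMin_cases (l : List Int) (i : Int) :
    l.foldl (fun pl npl => if npl < pl then npl else pl) i = i ∨
      l.foldl (fun pl npl => if npl < pl then npl else pl) i ∈ l := by
  induction l generalizing i with
  | nil => simp
  | cons a t ih =>
    simp only [List.foldl_cons, List.mem_cons]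
    rcases ih (if a < i then a else i) with h | h
    · rw [h]; split
      · exact Or.inr (Or.inl rfl)
      · exact Or.inl rfl
    · exact Or.inr (Or.inr h)

theorem foldMin_le_mem (l : List Int) (i x : Int) (hx : x ∈ l) :
    l.foldl (fun pl npl => if npl < pl then npl else pl) i ≤ x := by
  induction l generalizing i with
  | nil => simp at hx
  | cons a t ih =>
    simp only [List.foldl_cons]
    rcases List.mem_cons.mp hx with rfl | hx
    · exact le_trans (foldMin_le_init t _) (by split <;> omega)
    · exact ih _ hx

-- B's blocked set, membership
theorem blockedF_mem (v2 : Int) (been : List (Int × Int)) :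
    ∀ (acc : Finset Int) (u : Int),
      u ∈ been.foldl (fun acc p => if p.2 = v2 then insert p.1 acc else acc) acc ↔
        u ∈ acc ∨ (u, v2) ∈ been := by
  induction been with
  | nil => simp
  | cons p rest ih =>
    intro acc u
    simp only [List.foldl_cons, List.mem_cons]
    by_cases hp2 : p.2 = v2
    · rw [if_pos hp2, ih]
      simp only [Finset.mem_insert, Prod.ext_iff]
      constructor
      · rintro ((rfl | h) | h)
        · exact Or.inr (Or.inl ⟨rfl, hp2.symm⟩)
        · exact Or.inl h
        · exact Or.inr (Or.inr h)
      · rintro (h | (⟨h1, h2⟩ | h))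
        · exact Or.inl (Or.inr h)
        · exact Or.inl (Or.inl h1)
        · exact Or.inr h
    · rw [if_neg hp2, ih]
      simp only [Prod.ext_iff]
      constructor
      · rintro (h | h)
        · exact Or.inl h
        · exact Or.inr (Or.inr h)
      · rintro (h | (⟨h1, h2⟩ | h))
        · exact Or.inl h
        · exact absurd h2.symm hp2
        · exact Or.inr h

-- branch equations of the two ports
theorem ilbp_self (v1 v2 : Int) (word_props : List (String × List Int))
    (equalities : List (Int × Int)) (been : List (Int × Int)) (P : Int) (h : v1 = v2) :
    isLinkedbyParse v1 v2 word_props equalities been P = P := by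
  rw [isLinkedbyParse.eq_def, if_pos h]

theorem ilbp_cap (v1 v2 : Int) (word_props : List (String × List Int))
    (equalities : List (Int × Int)) (been : List (Int × Int)) (P : Int) (h12 : v1 ≠ v2)
    (hcap : P + 1 = 9) :
    isLinkedbyParse v1 v2 word_props equalities been P = P + 1 := by
  rw [isLinkedbyParse.eq_def, if_neg h12, if_pos hcap]

theorem ilbp_blocked (v1 v2 : Int) (word_props : List (String × List Int))
    (equalities : List (Int × Int)) (been : List (Int × Int)) (P : Int) (h12 : v1 ≠ v2)
    (hcap : ¬ (P + 1 = 9)) (hb : (v1, v2) ∈ been) :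
    isLinkedbyParse v1 v2 word_props equalities been P = 9 := by
  rw [isLinkedbyParse.eq_def, if_neg h12, if_neg hcap, if_pos hb]

theorem ilbp_adj (v1 v2 : Int) (word_props : List (String × List Int))
    (equalities : List (Int × Int)) (been : List (Int × Int)) (P : Int) (h12 : v1 ≠ v2)
    (hcap : ¬ (P + 1 = 9)) (hb : (v1, v2) ∉ been)
    (hL : lbpLoop v1 v2 word_props [] = none) :
    isLinkedbyParse v1 v2 word_props equalities been P = P + 1 := by
  rw [isLinkedbyParse.eq_def, if_neg h12, if_neg hcap, if_neg hb]
  split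
  · rfl
  · rename_i nbrs heq
    rw [hL] at heq
    simp at heq

theorem ilbp_rec (v1 v2 : Int) (word_props : List (String × List Int))
    (equalities : List (Int × Int)) (been : List (Int × Int)) (P : Int)
    (nbrs : List Int) (h12 : v1 ≠ v2) (hcap : ¬ (P + 1 = 9)) (hb : (v1, v2) ∉ been)
    (hL : lbpLoop v1 v2 word_props [] = some nbrs) :
    isLinkedbyParse v1 v2 word_props equalities been P =
      (nbrs.attach.map (fun n =>
        isLinkedbyParse n.1 v2 word_props equalities
          (been ++ [(v1, v2), (v2, v1)]) (P + 1))).foldl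
        (fun pl npl => if npl < pl then npl else pl) 9 := by
  rw [isLinkedbyParse.eq_def, if_neg h12, if_neg hcap, if_neg hb]
  split
  · rename_i heq
    rw [hL] at heq
    simp at heq
  · rename_i nbrs' heq
    rw [hL] at heq
    injection heq with h
    subst h
    rfl

theorem lbpBfs_empty (v2 : Int) (word_props : List (String × List Int)) (P : Int)
    (frontier seen : Finset Int) (dist : Int) (hf : frontier = ∅) :
    lbpBfs v2 word_props P frontier seen dist = 9 := by
  rw [lbpBfs.eq_def, dif_pos hf]

theorem lbpBfs_hit (v2 : Int) (word_props : List (String × List Int)) (P : Int)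
    (frontier seen : Finset Int) (dist : Int) (hf : ¬ frontier = ∅)
    (hS : lbpScan v2 frontier word_props ∅ = none) :
    lbpBfs v2 word_props P frontier seen dist = min 9 (P + dist) := by
  rw [lbpBfs.eq_def, dif_neg hf]
  split
  · rfl
  · rename_i nxt heq
    rw [hS] at heq
    simp at heq

theorem lbpBfs_step (v2 : Int) (word_props : List (String × List Int)) (P : Int)
    (frontier seen nxt : Finset Int) (dist : Int) (hf : ¬ frontier = ∅)
    (hS : lbpScan v2 frontier word_props ∅ = some nxt) :
    lbpBfs v2 word_props P frontier seen dist =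
      lbpBfs v2 word_props P (nxt \ seen) (seen ∪ (nxt \ seen)) (dist + 1) := by
  rw [lbpBfs.eq_def, dif_neg hf]
  split
  · rename_i heq
    rw [hS] at heq
    simp at heq
  · rename_i nxt' heq
    rw [hS] at heq
    injection heq with h
    subst h
    rfl

-- BFS invariant
def InvB (word_props : List (String × List Int)) (v2 : Int) (B : Int → Prop) (v1 : Int)
    (frontier seen : Finset Int) (d : ℕ) : Prop :=
  (∀ u, u ∈ frontier ↔ mrp word_props v1 B d u) ∧
  (∀ u, u ∈ seen ↔ (B u ∨ ∃ j ≤ d, rp word_props v1 B j u)) ∧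
  (∀ j u, j < d → rp word_props v1 B j u → ¬ edgeP word_props u v2)

theorem lbpBMeasure_lt (v2 : Int) (word_props : List (String × List Int))
    (frontier seen nxt : Finset Int) (hf : ¬ frontier = ∅)
    (hS : lbpScan v2 frontier word_props ∅ = some nxt) :
    lbpBMeasure word_props (nxt \ seen) (seen ∪ (nxt \ seen)) <
      lbpBMeasure word_props frontier seen := by
  by_cases hne : nxt \ seen = ∅
  · simp only [lbpBMeasure, hne, Finset.union_empty, if_pos, if_neg hf]
    omega
  · obtain ⟨x, hx⟩ := Finset.nonempty_iff_ne_empty.mpr hne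
    have hxn : x ∈ nxt ∧ x ∉ seen := by simpa [Finset.mem_sdiff] using hx
    have hxU : x ∈ lbpU word_props := by
      have := ((lbpScan_some v2 frontier word_props ∅ nxt hS).1 x).mp hxn.1
      simp only [Finset.notMem_empty, false_or] at this
      obtain ⟨pa, hpa, _, hxpa⟩ := this
      exact (mem_lbpU word_props x).mpr ⟨pa, hpa, hxpa⟩
    have hlt : ((lbpU word_props) \ (seen ∪ (nxt \ seen))).card <
        ((lbpU word_props) \ seen).card := by
      apply Finset.card_lt_card
      constructor
      · intro u hu
        simp only [Finset.mem_sdiff, Finset.mem_union] at *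
        exact ⟨hu.1, fun hc => hu.2 (Or.inl hc)⟩
      · intro hall
        have hx1 : x ∈ (lbpU word_props) \ seen := by
          simp only [Finset.mem_sdiff]
          exact ⟨hxU, hxn.2⟩
        have := hall hx1
        simp only [Finset.mem_sdiff, Finset.mem_union] at this
        exact this.2 (Or.inr ⟨hxn.1, hxn.2⟩)
    simp only [lbpBMeasure, if_neg hf]
    have hind : (if nxt \ seen = ∅ then 0 else 1) ≤ 1 := by split <;> omega
    omega

theorem bfs_good (word_props : List (String × List Int)) (v2 : Int) (B : Int → Prop)
    (v1 P : Int) :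
    ∀ (N : ℕ) (frontier seen : Finset Int) (d : ℕ),
      lbpBMeasure word_props frontier seen ≤ N →
      InvB word_props v2 B v1 frontier seen d →
      GoodV word_props v2 B P v1 (lbpBfs v2 word_props P frontier seen ((d : Int) + 1)) := by
  intro N
  induction N using Nat.strong_induction_on with
  | _ N IH =>
  intro frontier seen d hN hInv
  obtain ⟨hF, hSn, hD⟩ := hInv
  by_cases hf : frontier = ∅
  · rw [lbpBfs_empty v2 word_props P frontier seen _ hf]
    refine ⟨le_refl _, ?_, Or.inl rfl⟩
    intro k hk
    exfalso
    cases k with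
    | zero => simp [hp] at hk
    | succ k' =>
      obtain ⟨u, hu, hue⟩ := (hp_iff_rp word_props v2 B k' v1).mp hk
      obtain ⟨j0, hj0, hm0⟩ := exists_mrp word_props v1 B k' u hu
      rcases Nat.lt_or_ge j0 d with hlt | hge
      · exact hD j0 u hlt hm0.1 hue
      · obtain ⟨w, hw⟩ := mrp_below word_props v1 B j0 u hm0 d hge
        have := (hF w).mpr hw
        rw [hf] at this
        exact absurd this (Finset.notMem_empty w)
  · cases hscan : lbpScan v2 frontier word_props ∅ with
    | none =>
      rw [lbpBfs_hit v2 word_props P frontier seen _ hf hscan]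
      obtain ⟨pa, hpa, ⟨a, hapa, haf⟩, hv2pa⟩ := (lbpScan_none_iff v2 frontier word_props ∅).mp hscan
      have hrpa : rp word_props v1 B d a := ((hF a).mp haf).1
      have hedge : edgeP word_props a v2 := ⟨pa, hpa, hapa, hv2pa⟩
      have hhp : hp word_props v2 B (d + 1) v1 := (hp_iff_rp word_props v2 B d v1).mpr ⟨a, hrpa, hedge⟩
      have hmin : ∀ k : ℕ, hp word_props v2 B k v1 → d + 1 ≤ k := by
        intro k hk
        cases k with
        | zero => simp [hp] at hk
        | succ k' =>
          obtain ⟨u, hu, hue⟩ := (hp_iff_rp word_props v2 B k' v1).mp hk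
          obtain ⟨j0, hj0, hm0⟩ := exists_mrp word_props v1 B k' u hu
          rcases Nat.lt_or_ge j0 d with hlt | hge
          · exact absurd hue (hD j0 u hlt hm0.1)
          · omega
      refine ⟨min_le_left _ _, ?_, ?_⟩
      · intro k hk
        have h1 := hmin k hk
        have h2 : ((d : Int) + 1) ≤ (k : Int) := by exact_mod_cast h1
        have h3 : min 9 (P + ((d : Int) + 1)) ≤ P + ((d : Int) + 1) := min_le_right _ _
        omega
      · by_cases h9 : 9 ≤ P + ((d : Int) + 1)
        · exact Or.inl (min_eq_left h9)
        · refine Or.inr ⟨d + 1, hhp, ?_⟩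
          rw [min_eq_right (by omega)]
          push_cast
          ring
    | some nxt =>
      rw [lbpBfs_step v2 word_props P frontier seen nxt _ hf hscan]
      obtain ⟨hmem, hnov2⟩ := lbpScan_some v2 frontier word_props ∅ nxt hscan
      have hF' : ∀ u, u ∈ nxt \ seen ↔ mrp word_props v1 B (d + 1) u := by
        intro u
        constructor
        · intro hu
          have hu2 : u ∈ nxt ∧ u ∉ seen := by simpa [Finset.mem_sdiff] using hu
          have := (hmem u).mp hu2.1
          simp only [Finset.notMem_empty, false_or] at this
          obtain ⟨pa, hpa, ⟨a, hapa, haf⟩, hupa⟩ := this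
          have hma : mrp word_props v1 B d a := (hF a).mp haf
          have hedge : edgeP word_props a u := ⟨pa, hpa, hapa, hupa⟩
          have hnB : ¬ B u := fun hc => hu2.2 ((hSn u).mpr (Or.inl hc))
          refine ⟨⟨hnB, a, hma.1, hedge⟩, ?_⟩
          intro i hi hrpi
          exact hu2.2 ((hSn u).mpr (Or.inr ⟨i, by omega, hrpi⟩))
        · rintro ⟨⟨hnB, w, hrw, hedge⟩, hmin⟩
          obtain ⟨j1, hj1, hmw⟩ := exists_mrp word_props v1 B d w hrw
          have hj1d : j1 = d := by
            by_contra hne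
            exact hmin (j1 + 1) (by omega) ⟨hnB, w, hmw.1, hedge⟩
          subst hj1d
          have hwf : w ∈ frontier := (hF w).mpr hmw
          obtain ⟨pa, hpa, hwpa, hupa⟩ := hedge
          have hunxt : u ∈ nxt := (hmem u).mpr (Or.inr ⟨pa, hpa, ⟨w, hwpa, hwf⟩, hupa⟩)
          have huseen : u ∉ seen := by
            intro hc
            rcases (hSn u).mp hc with hB | ⟨j, hj, hrpj⟩
            · exact hnB hB
            · exact hmin j (by omega) hrpj
          exact Finset.mem_sdiff.mpr ⟨hunxt, huseen⟩
      have hInv' : InvB word_props v2 B v1 (nxt \ seen) (seen ∪ (nxt \ seen)) (d + 1) := by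
        refine ⟨hF', ?_, ?_⟩
        · intro u
          constructor
          · intro hu
            rcases Finset.mem_union.mp hu with hu | hu
            · rcases (hSn u).mp hu with hB | ⟨j, hj, hrpj⟩
              · exact Or.inl hB
              · exact Or.inr ⟨j, by omega, hrpj⟩
            · exact Or.inr ⟨d + 1, le_refl _, ((hF' u).mp hu).1⟩
          · rintro (hB | ⟨j, hj, hrpj⟩)
            · exact Finset.mem_union.mpr (Or.inl ((hSn u).mpr (Or.inl hB)))
            · rcases Nat.lt_or_ge j (d + 1) with hlt | hge
              · exact Finset.mem_union.mpr (Or.inl ((hSn u).mpr (Or.inr ⟨j, by omega, hrpj⟩)))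
              · have hj' : j = d + 1 := by omega
                subst hj'
                obtain ⟨j0, hj0, hm0⟩ := exists_mrp word_props v1 B (d + 1) u hrpj
                rcases Nat.lt_or_ge j0 (d + 1) with hlt0 | hge0
                · exact Finset.mem_union.mpr (Or.inl ((hSn u).mpr (Or.inr ⟨j0, by omega, hm0.1⟩)))
                · have hj0' : j0 = d + 1 := by omega
                  subst hj0'
                  exact Finset.mem_union.mpr (Or.inr ((hF' u).mpr hm0))
        · intro j u hj hrpj hedge
          rcases Nat.lt_or_ge j d with hlt | hge
          · exact hD j u hlt hrpj hedge
          · have hjd : j = d := by omega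
            subst hjd
            obtain ⟨j0, hj0, hm0⟩ := exists_mrp word_props v1 B j u hrpj
            rcases Nat.lt_or_ge j0 j with hlt0 | hge0
            · exact hD j0 u hlt0 hm0.1 hedge
            · have hj0' : j0 = j := by omega
              subst hj0'
              have hufront : u ∈ frontier := (hF u).mpr hm0
              obtain ⟨pa, hpa, hupa, hv2pa⟩ := hedge
              exact hnov2 pa hpa ⟨u, hupa, hufront⟩ hv2pa
      have hlt := lbpBMeasure_lt v2 word_props frontier seen nxt hf hscan
      have hG := IH (lbpBMeasure word_props (nxt \ seen) (seen ∪ (nxt \ seen)))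
        (by omega) (nxt \ seen) (seen ∪ (nxt \ seen)) (d + 1) (le_refl _) hInv'
      have hcast : (((d + 1 : ℕ) : Int) + 1) = ((d : Int) + 1 + 1) := by push_cast; ring
      rw [hcast] at hG
      exact hG

theorem been_append_iff (v1 v2 u : Int) (been : List (Int × Int)) (h12 : v1 ≠ v2) :
    (u, v2) ∈ been ++ [(v1, v2), (v2, v1)] ↔ u = v1 ∨ (u, v2) ∈ been := by
  constructor
  · intro h
    rcases List.mem_append.mp h with h | h
    · exact Or.inr h
    · rcases List.mem_cons.mp h with h | h
      · exact Or.inl (congrArg Prod.fst h)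
      · rcases List.mem_cons.mp h with h | h
        · exact absurd (congrArg Prod.snd h).symm h12
        · simp at h
  · rintro (h | h)
    · exact List.mem_append.mpr (Or.inr (List.mem_cons.mpr (Or.inl (by rw [h]))))
    · exact List.mem_append.mpr (Or.inl h)

theorem A_good_cap (v2 : Int) (word_props : List (String × List Int))
    (equalities : List (Int × Int)) (v1 : Int) (been : List (Int × Int)) (h12 : v1 ≠ v2) :
    GoodV word_props v2 (fun u => (u, v2) ∈ been) 8 v1
      (isLinkedbyParse v1 v2 word_props equalities been 8) := by
  rw [ilbp_cap v1 v2 word_props equalities been 8 h12 (by norm_num)]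
  refine ⟨by norm_num, ?_, Or.inl (by norm_num)⟩
  intro k hk
  have h1 := hp_pos word_props v2 _ k v1 hk
  have h2 : (1 : Int) ≤ (k : Int) := by exact_mod_cast h1
  omega

theorem A_good (v2 : Int) (word_props : List (String × List Int)) (equalities : List (Int × Int)) :
    ∀ (m : ℕ) (P : Int) (v1 : Int) (been : List (Int × Int)), v1 ≠ v2 → P ≤ 8 →
      8 - P ≤ (m : Int) →
      GoodV word_props v2 (fun u => (u, v2) ∈ been) P v1
        (isLinkedbyParse v1 v2 word_props equalities been P) := by
  intro m
  induction m with
  | zero =>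
    intro P v1 been h12 hP8 hm
    have hP : P = 8 := by
      have : ((0 : ℕ) : Int) = 0 := rfl
      omega
    subst hP
    exact A_good_cap v2 word_props equalities v1 been h12
  | succ m ih =>
    intro P v1 been h12 hP8 hm
    by_cases hP : P = 8
    · subst hP
      exact A_good_cap v2 word_props equalities v1 been h12
    · have hP7 : P ≤ 7 := by omega
      have hcap : ¬ (P + 1 = 9) := by omega
      by_cases hb : (v1, v2) ∈ been
      · rw [ilbp_blocked v1 v2 word_props equalities been P h12 hcap hb]
        refine ⟨le_refl _, ?_, Or.inl rfl⟩
        intro k hk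
        exact absurd hb (hp_not_blocked word_props v2 _ k v1 hk)
      · cases hL : lbpLoop v1 v2 word_props [] with
        | none =>
          rw [ilbp_adj v1 v2 word_props equalities been P h12 hcap hb hL]
          have hedge : edgeP word_props v1 v2 := by
            obtain ⟨pa, hpa, h1, h2⟩ := (lbpLoop_none_iff v1 v2 word_props []).mp hL
            exact ⟨pa, hpa, h1, h2⟩
          refine ⟨by omega, ?_, Or.inr ⟨1, ⟨hb, Or.inl ⟨rfl, hedge⟩⟩, by norm_num⟩⟩
          intro k hk
          have h1 := hp_pos word_props v2 _ k v1 hk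
          have h2 : (1 : Int) ≤ (k : Int) := by exact_mod_cast h1
          omega
        | some nbrs =>
          rw [ilbp_rec v1 v2 word_props equalities been P nbrs h12 hcap hb hL]
          have hBeq : ∀ u, (u, v2) ∈ been ++ [(v1, v2), (v2, v1)] ↔
              (u = v1 ∨ (u, v2) ∈ been) := fun u => been_append_iff v1 v2 u been h12
          have hnbr_iff : ∀ x, x ∈ nbrs ↔
              ∃ pa ∈ word_props, v1 ∈ pa.2 ∧ x ∈ pa.2 ∧ x ≠ v1 := by
            intro x
            rw [lbpLoop_some_iff v1 v2 word_props [] nbrs hL x]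
            simp
          have hnoadj : ¬ edgeP word_props v1 v2 := by
            rintro ⟨pa, hpa, h1, h2⟩
            have := (lbpLoop_none_iff v1 v2 word_props []).mpr ⟨pa, hpa, h1, h2⟩
            rw [hL] at this
            simp at this
          have hchild : ∀ n ∈ nbrs,
              GoodV word_props v2 (fun u => (u, v2) ∈ been ++ [(v1, v2), (v2, v1)]) (P + 1) n
                (isLinkedbyParse n v2 word_props equalities (been ++ [(v1, v2), (v2, v1)]) (P + 1)) := by
            intro n hn
            have hnv2 : n ≠ v2 := by
              rintro rfl
              obtain ⟨pa, hpa, hv1, hn2, _⟩ := (hnbr_iff n).mp hn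
              exact hnoadj ⟨pa, hpa, hv1, hn2⟩
            refine ih (P + 1) n (been ++ [(v1, v2), (v2, v1)]) hnv2 (by omega) ?_
            have : ((m + 1 : ℕ) : Int) = (m : Int) + 1 := by push_cast; ring
            omega
          have hmemL : ∀ x, x ∈ (nbrs.attach.map (fun n =>
              isLinkedbyParse n.1 v2 word_props equalities
                (been ++ [(v1, v2), (v2, v1)]) (P + 1))) ↔
              ∃ n, ∃ _ : n ∈ nbrs, x = isLinkedbyParse n v2 word_props equalities
                (been ++ [(v1, v2), (v2, v1)]) (P + 1) := by
            intro x
            simp only [List.mem_map, List.mem_attach, true_and, Subtype.exists]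
            constructor
            · rintro ⟨n, hn, heq⟩
              exact ⟨n, hn, heq.symm⟩
            · rintro ⟨n, hn, heq⟩
              exact ⟨n, hn, heq.symm⟩
          refine ⟨foldMin_le_init _ _, ?_, ?_⟩
          · intro k hk
            rcases hp_strip word_props v2 v1 (fun u => (u, v2) ∈ been) k v1 hk with
              hk' | hedge | ⟨n, k', hen, hk', hklt⟩
            · exact absurd (Or.inl rfl) (hp_not_blocked word_props v2 _ k v1 hk')
            · exact absurd hedge hnoadj
            · have hnB' := hp_not_blocked word_props v2 _ k' n hk'
              have hnv1 : n ≠ v1 := fun hc => hnB' (Or.inl hc)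
              obtain ⟨pa, hpa, hv1pa, hnpa⟩ := hen
              have hnnb : n ∈ nbrs := (hnbr_iff n).mpr ⟨pa, hpa, hv1pa, hnpa, hnv1⟩
              have hg := hchild n hnnb
              have hk'' : hp word_props v2 (fun u => (u, v2) ∈ been ++ [(v1, v2), (v2, v1)]) k' n :=
                (hp_congr word_props v2 _ _ hBeq k' n).mpr hk'
              have hle := hg.2.1 k' hk''
              have hΦle := foldMin_le_mem _ 9 _ ((hmemL _).mpr ⟨n, hnnb, rfl⟩)
              have hcast : (k' : Int) + 1 ≤ (k : Int) := by exact_mod_cast hklt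
              omega
          · rcases foldMin_cases (nbrs.attach.map (fun n =>
                isLinkedbyParse n.1 v2 word_props equalities
                  (been ++ [(v1, v2), (v2, v1)]) (P + 1))) 9 with h | h
            · exact Or.inl h
            · obtain ⟨n, hn, hfn⟩ := (hmemL _).mp h
              have hg := hchild n hn
              rcases hg.2.2 with h9 | ⟨k'', hk'', hval⟩
              · exact Or.inl (by rw [hfn, h9])
              · refine Or.inr ⟨k'' + 1, ?_, ?_⟩
                · have hknB : hp word_props v2 (fun u => u = v1 ∨ (u, v2) ∈ been) k'' n :=
                    (hp_congr word_props v2 _ _ hBeq k'' n).mp hk''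
                  have hkB : hp word_props v2 (fun u => (u, v2) ∈ been) k'' n :=
                    hp_mono word_props v2 _ _ (fun x hx => Or.inr hx) k'' n hknB
                  obtain ⟨pa, hpa, hv1pa, hnpa, _⟩ := (hnbr_iff n).mp hn
                  exact ⟨hb, Or.inr ⟨n, ⟨pa, hpa, hv1pa, hnpa⟩, hkB⟩⟩
                · rw [hfn, hval]
                  push_cast
                  ring

theorem A_ge9 (v2 : Int) (word_props : List (String × List Int)) (equalities : List (Int × Int)) :
    ∀ (N : ℕ) (P : Int) (v1 : Int) (been : List (Int × Int)),
      lbpMeasure v2 word_props v1 been ≤ N → 9 ≤ P →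
      9 ≤ isLinkedbyParse v1 v2 word_props equalities been P := by
  intro N
  induction N using Nat.strong_induction_on with
  | _ N IH =>
  intro P v1 been hN hP9
  by_cases h12 : v1 = v2
  · rw [ilbp_self v1 v2 word_props equalities been P h12]
    exact hP9
  · by_cases hcap : P + 1 = 9
    · rw [ilbp_cap v1 v2 word_props equalities been P h12 hcap]
      omega
    · by_cases hb : (v1, v2) ∈ been
      · rw [ilbp_blocked v1 v2 word_props equalities been P h12 hcap hb]
      · cases hL : lbpLoop v1 v2 word_props [] with
        | none =>
          rw [ilbp_adj v1 v2 word_props equalities been P h12 hcap hb hL]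
          omega
        | some nbrs =>
          rw [ilbp_rec v1 v2 word_props equalities been P nbrs h12 hcap hb hL]
          rcases foldMin_cases (nbrs.attach.map (fun n =>
              isLinkedbyParse n.1 v2 word_props equalities
                (been ++ [(v1, v2), (v2, v1)]) (P + 1))) 9 with h | h
          · omega
          · simp only [List.mem_map, List.mem_attach, true_and, Subtype.exists] at h
            obtain ⟨n, hn, heq⟩ := h
            rw [← heq]
            have hnU : n ∈ lbpU word_props := by
              have := (lbpLoop_some_iff v1 v2 word_props [] nbrs hL n).mp hn
              simp only [List.not_mem_nil, false_or] at this
              obtain ⟨pa, hpa, _, hnpa, _⟩ := this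
              exact (mem_lbpU word_props n).mpr ⟨pa, hpa, hnpa⟩
            have hlt := lbpMeasure_lt v2 word_props v1 n been h12 hb hnU
            exact IH (lbpMeasure v2 word_props n (been ++ [(v1, v2), (v2, v1)]))
              (by omega) (P + 1) n (been ++ [(v1, v2), (v2, v1)]) (le_refl _) (by omega)

theorem alt_self (v1 v2 : Int) (word_props : List (String × List Int))
    (equalities : List (Int × Int)) (been : List (Int × Int)) (P : Int) (h : v1 = v2) :
    isLinkedbyParse_alt v1 v2 word_props equalities been P = P := by
  rw [isLinkedbyParse_alt, if_pos h]

theorem alt_blocked (v1 v2 : Int) (word_props : List (String × List Int))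
    (equalities : List (Int × Int)) (been : List (Int × Int)) (P : Int) (h12 : v1 ≠ v2)
    (hb : (v1, v2) ∈ been) :
    isLinkedbyParse_alt v1 v2 word_props equalities been P = 9 := by
  rw [isLinkedbyParse_alt, if_neg h12]
  have hv : v1 ∈ been.foldl (fun acc p => if p.2 = v2 then insert p.1 acc else acc)
      (∅ : Finset Int) := (blockedF_mem v2 been ∅ v1).mpr (Or.inr hb)
  simp only [hv, if_pos]

theorem alt_adj (v1 v2 : Int) (word_props : List (String × List Int))
    (equalities : List (Int × Int)) (been : List (Int × Int)) (P : Int) (h12 : v1 ≠ v2)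
    (hb : (v1, v2) ∉ been) (hadj : ∃ pa ∈ word_props, v1 ∈ pa.2 ∧ v2 ∈ pa.2) :
    isLinkedbyParse_alt v1 v2 word_props equalities been P = P + 1 := by
  rw [isLinkedbyParse_alt, if_neg h12]
  have hv : v1 ∉ been.foldl (fun acc p => if p.2 = v2 then insert p.1 acc else acc)
      (∅ : Finset Int) := by
    intro hc
    rcases (blockedF_mem v2 been ∅ v1).mp hc with h | h
    · simp at h
    · exact hb h
  simp only [if_neg hv, if_pos hadj]

theorem alt_bfs (v1 v2 : Int) (word_props : List (String × List Int))
    (equalities : List (Int × Int)) (been : List (Int × Int)) (P : Int) (h12 : v1 ≠ v2)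
    (hb : (v1, v2) ∉ been) (hadj : ¬ ∃ pa ∈ word_props, v1 ∈ pa.2 ∧ v2 ∈ pa.2) :
    isLinkedbyParse_alt v1 v2 word_props equalities been P =
      lbpBfs v2 word_props P {v1}
        (insert v1 (been.foldl (fun acc p => if p.2 = v2 then insert p.1 acc else acc)
          (∅ : Finset Int))) 1 := by
  rw [isLinkedbyParse_alt, if_neg h12]
  have hv : v1 ∉ been.foldl (fun acc p => if p.2 = v2 then insert p.1 acc else acc)
      (∅ : Finset Int) := by
    intro hc
    rcases (blockedF_mem v2 been ∅ v1).mp hc with h | h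
    · simp at h
    · exact hb h
  simp only [if_neg hv, if_neg hadj]

-- ===== VERDICT (by name: the statement is the Claim_ definition above) =====
theorem isLinkedbyParse_spec : Claim_equal_isLinkedbyParse := by
  unfold Claim_equal_isLinkedbyParse
  intro v1 v2 word_props equalities been P _
  unfold Spec_isLinkedbyParse
  by_cases h12 : v1 = v2
  · rw [ilbp_self v1 v2 word_props equalities been P h12,
      alt_self v1 v2 word_props equalities been P h12]
  · by_cases hb : (v1, v2) ∈ been
    · rw [alt_blocked v1 v2 word_props equalities been P h12 hb]
      by_cases hcap : P + 1 = 9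
      · rw [ilbp_cap v1 v2 word_props equalities been P h12 hcap]
        exact hcap
      · exact ilbp_blocked v1 v2 word_props equalities been P h12 hcap hb
    · by_cases hadj : ∃ pa ∈ word_props, v1 ∈ pa.2 ∧ v2 ∈ pa.2
      · rw [alt_adj v1 v2 word_props equalities been P h12 hb hadj]
        by_cases hcap : P + 1 = 9
        · exact ilbp_cap v1 v2 word_props equalities been P h12 hcap
        · exact ilbp_adj v1 v2 word_props equalities been P h12 hcap hb
            ((lbpLoop_none_iff v1 v2 word_props []).mpr hadj)
      · rw [alt_bfs v1 v2 word_props equalities been P h12 hb hadj]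
        set blockedF := been.foldl (fun acc p => if p.2 = v2 then insert p.1 acc else acc)
          (∅ : Finset Int) with hblk
        have hbF : ∀ u, u ∈ blockedF ↔ (u, v2) ∈ been := by
          intro u
          rw [hblk, blockedF_mem v2 been ∅ u]
          simp
        have hInv0 : InvB word_props v2 (fun u => (u, v2) ∈ been) v1 {v1}
            (insert v1 blockedF) 0 := by
          refine ⟨?_, ?_, ?_⟩
          · intro u
            constructor
            · intro hu
              have hu1 : u = v1 := Finset.mem_singleton.mp hu
              subst hu1
              exact ⟨⟨rfl, hb⟩, fun i hi => by omega⟩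
            · intro hu
              exact Finset.mem_singleton.mpr hu.1.1
          · intro u
            constructor
            · intro hu
              rcases Finset.mem_insert.mp hu with rfl | hu
              · exact Or.inr ⟨0, le_refl _, rfl, hb⟩
              · exact Or.inl ((hbF u).mp hu)
            · rintro (hB | ⟨j, hj, hrpj⟩)
              · exact Finset.mem_insert.mpr (Or.inr ((hbF u).mpr hB))
              · have hj0 : j = 0 := by omega
                subst hj0
                exact Finset.mem_insert.mpr (Or.inl hrpj.1)
          · intro j u hj
            omega
        have hGB := bfs_good word_props v2 (fun u => (u, v2) ∈ been) v1 P
          (lbpBMeasure word_props {v1} (insert v1 blockedF)) {v1} (insert v1 blockedF) 0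
          (le_refl _) hInv0
        have hc : (((0 : ℕ) : Int) + 1) = (1 : Int) := by norm_num
        rw [hc] at hGB
        by_cases hP8 : P ≤ 8
        · have hGA := A_good v2 word_props equalities (8 - P).toNat P v1 been h12 hP8
            (Int.self_le_toNat _)
          exact GoodV_unique word_props v2 (fun u => (u, v2) ∈ been) P v1 _ _ hGA hGB
        · have hP9 : 9 ≤ P := by omega
          have hB9 : lbpBfs v2 word_props P {v1} (insert v1 blockedF) 1 = 9 := by
            obtain ⟨hle9, _, h3⟩ := hGB
            rcases h3 with h | ⟨k, hk, hval⟩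
            · exact h
            · have hk1 := hp_pos word_props v2 _ k v1 hk
              have : (1 : Int) ≤ (k : Int) := by exact_mod_cast hk1
              omega
          rw [hB9]
          cases hL : lbpLoop v1 v2 word_props [] with
          | none =>
            exfalso
            exact hadj ((lbpLoop_none_iff v1 v2 word_props []).mp hL)
          | some nbrs =>
            have hcap : ¬ (P + 1 = 9) := by omega
            rw [ilbp_rec v1 v2 word_props equalities been P nbrs h12 hcap hb hL]
            have hub := foldMin_le_init (nbrs.attach.map (fun n =>
              isLinkedbyParse n.1 v2 word_props equalities
                (been ++ [(v1, v2), (v2, v1)]) (P + 1))) 9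
            rcases foldMin_cases (nbrs.attach.map (fun n =>
                isLinkedbyParse n.1 v2 word_props equalities
                  (been ++ [(v1, v2), (v2, v1)]) (P + 1))) 9 with h | h
            · exact h
            · simp only [List.mem_map, List.mem_attach, true_and, Subtype.exists] at h
              obtain ⟨n, hn, heq⟩ := h
              have hge := A_ge9 v2 word_props equalities
                (lbpMeasure v2 word_props n (been ++ [(v1, v2), (v2, v1)])) (P + 1) n
                (been ++ [(v1, v2), (v2, v1)]) (le_refl _) (by omega)
              omega
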